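-- pv_equiv track=rewrite | github.com/suyeun84/Algorithm | 프로그래머스/2/42626. 더 맵게/더 맵게.py | solution
-- ===== SOURCE A (Python) =====
-- import heapq
--
-- def solution(scoville, K):
--     answer = 0
--     heapq.heapify(scoville)
--     while len(scoville) >= 2:
--         min1 = heapq.heappop(scoville)
--         if min1 >= K:
--             break
--         min2 = heapq.heappop(scoville)
--         heapq.heappush(scoville, min1+min2*2)
--         answer += 1
--
--     if scoville[0] < K:
--         return -1
--
--     return answer
-- ===== SOURCE B (Python) =====
-- # B: keep a fully sorted ascending list instead of a heap; sort once, pop the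
-- # two smallest from the front, re-insert the mix at its sorted position.
-- # Unlike A, B does not mutate its `scoville` argument (A heapifies/pops it in
-- # place); the equivalence is about the return value only.
-- def _insort(s, x):
--     i = 0
--     while i < len(s) and s[i] <= x:
--         i += 1
--     s.insert(i, x)
--
-- def solution(scoville, K):
--     s = sorted(scoville)
--     count = 0
--     while len(s) >= 2 and s[0] < K:
--         m1 = s.pop(0)
--         m2 = s.pop(0)
--         _insort(s, m1 + 2 * m2)
--         count += 1
--     if s[0] < K:
--         return -1
--     return count
-- ===== Notes on version B (the rewrite author's own statement) =====
-- stated objective: alternative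
-- what changed: Replaces the binary heap with a fully sorted ascending list: sort once, take the two smallest from the front, and re-insert the combined value at its sorted position; the break-with-popped-element quirk of A disappears because B tests s[0] before popping.
import Mathlib
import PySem

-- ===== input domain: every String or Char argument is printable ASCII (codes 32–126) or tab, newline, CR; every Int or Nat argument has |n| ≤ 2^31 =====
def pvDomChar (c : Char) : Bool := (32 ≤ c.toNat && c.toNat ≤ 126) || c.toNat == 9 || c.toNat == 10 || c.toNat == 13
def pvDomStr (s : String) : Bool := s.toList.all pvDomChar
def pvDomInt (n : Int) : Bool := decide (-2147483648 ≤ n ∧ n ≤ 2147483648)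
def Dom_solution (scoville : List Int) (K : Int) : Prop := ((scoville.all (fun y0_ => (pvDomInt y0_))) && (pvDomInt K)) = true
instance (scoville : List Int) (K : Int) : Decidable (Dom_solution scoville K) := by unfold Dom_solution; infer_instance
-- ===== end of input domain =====

-- B maintains a fully sorted list (sort once, pop two smallest, insert the mix in place)
-- instead of A's binary heap; same return value, similar cost. A mutates its `scoville`
-- argument in place (heapify/pops); B does not — the claim is about the return value only.


-- ===== PORT A =====
-- heapq is ported by its value-level contract, exact for a heap of Ints whose result
-- depends only on the multiset of values: heap[0] / heappop yield the heap minimum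
-- (PySem.List.min?), heappop removes that occurrence (List.erase), heappush appends.
def solutionLoopA : Nat → List Int → Int → Int → List Int × Int
  | 0, heap, _, answer => (heap, answer)
  | fuel+1, heap, K, answer =>
    if 2 ≤ heap.length then
      match PySem.List.min? heap (fun x => x) with
      | none => (heap, answer)          -- unreachable: heap has ≥ 2 elements
      | some min1 =>
        -- heappop removed min1; on break min1 stays popped
        if min1 ≥ K then (heap.erase min1, answer)
        else
          match PySem.List.min? (heap.erase min1) (fun x => x) with
          | none => (heap.erase min1, answer)      -- unreachable
          | some min2 =>
            solutionLoopA fuel ((heap.erase min1).erase min2 ++ [min1 + min2 * 2]) K (answer + 1)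
    else (heap, answer)

def solution (scoville : List Int) (K : Int) : Int :=
  match solutionLoopA scoville.length scoville K 0 with
  | (heap, answer) =>
    match PySem.List.min? heap (fun x => x) with  -- scoville[0]: the heap minimum
    | none => -1                                  -- IndexError on []; excluded by Pre_
    | some m => if m < K then -1 else answer

-- ===== PORT B =====
-- _insort: insert x into the sorted list before the first element exceeding it
def insortLin (x : Int) : List Int → List Int
  | [] => [x]
  | y :: ys => if y ≤ x then y :: insortLin x ys else x :: y :: ys

def solutionLoopB : Nat → List Int → Int → Int → List Int × Int
  | 0, s, _, count => (s, count)
  | fuel+1, s, K, count =>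
    match s with
    | m1 :: m2 :: rest =>
      if m1 < K then solutionLoopB fuel (insortLin (m1 + 2 * m2) rest) K (count + 1)
      else (s, count)
    | _ => (s, count)

def solution_alt (scoville : List Int) (K : Int) : Int :=
  match solutionLoopB (PySem.List.sorted scoville (fun x => x) false).length
      (PySem.List.sorted scoville (fun x => x) false) K 0 with
  | ([], _) => -1                                 -- IndexError on []; excluded by Pre_
  | (m :: _, count) => if m < K then -1 else count

-- ===== PRECONDITION & SPEC =====
-- A raises IndexError at `scoville[0]` exactly when the input list is empty.
def Pre_solution (scoville : List Int) (K : Int) : Prop := scoville ≠ []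
instance (scoville : List Int) (K : Int) : Decidable (Pre_solution scoville K) := by unfold Pre_solution; infer_instance
def pvWitness_solution : List Int × Int := ([1, 2, 3, 9, 10, 12], 7)

def Spec_solution (scoville : List Int) (K : Int) (out : Int) : Prop := out = solution_alt scoville K
instance (scoville : List Int) (K : Int) (out : Int) : Decidable (Spec_solution scoville K out) := by unfold Spec_solution; infer_instance

-- ===== CLAIM (what is proved, stated in full; the proofs are below) =====
def Claim_equal_solution : Prop := ∀ (scoville : List Int) (K : Int), Dom_solution scoville K → Pre_solution scoville K → Spec_solution scoville K (solution scoville K)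

-- ===== LEMMAS AND PROOFS =====

-- the minimum of any permutation of a sorted nonempty list is its head
theorem min?_of_perm_sorted (h : List Int) (m : Int) (t : List Int)
    (hp : h.Perm (m :: t)) (hs : (m :: t).Pairwise (· ≤ ·)) :
    PySem.List.min? h (fun x => x) = some m := by
  cases e : PySem.List.min? h (fun x => x) with
  | none =>
      have := (PySem.List.min?_eq_none_iff h (fun x => x)).1 e
      subst this
      exact absurd hp.symm (by simp)
  | some m' =>
      have hm' : m' ∈ m :: t := hp.mem_iff.1 (PySem.List.min?_mem e)
      have hmin : ∀ y ∈ h, m' ≤ y := PySem.List.min?_isMin e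
      have h1 : m' ≤ m := hmin m (hp.mem_iff.2 (List.mem_cons_self))
      have h2 : m ≤ m' := by
        rcases List.mem_cons.1 hm' with h' | h'
        · omega
        · exact (List.pairwise_cons.1 hs).1 m' h'
      exact congrArg some (le_antisymm h1 h2)

theorem insortLin_perm (x : Int) (l : List Int) : (insortLin x l).Perm (x :: l) := by
  induction l with
  | nil => simp [insortLin]
  | cons y ys ih =>
      simp only [insortLin]
      split
      · exact (ih.cons y).trans (List.Perm.swap x y ys)
      · exact List.Perm.refl _

theorem insortLin_pairwise (x : Int) (l : List Int) (hs : l.Pairwise (· ≤ ·)) :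
    (insortLin x l).Pairwise (· ≤ ·) := by
  induction l with
  | nil => simp [insortLin]
  | cons y ys ih =>
      rcases List.pairwise_cons.1 hs with ⟨hy, hys⟩
      simp only [insortLin]
      split
      · refine List.pairwise_cons.2 ⟨?_, ih hys⟩
        intro z hz
        rcases List.mem_cons.1 ((insortLin_perm x ys).mem_iff.1 hz) with h | h
        · omega
        · exact hy z h
      · refine List.pairwise_cons.2 ⟨?_, hs⟩
        intro z hz
        rcases List.mem_cons.1 hz with h | h
        · omega
        · exact le_trans (by omega) (hy z h)

-- the final `scoville[0] < K` check, on each side's loop result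
def finishA (p : List Int × Int) (K : Int) : Int :=
  match PySem.List.min? p.1 (fun x => x) with
  | none => -1
  | some m => if m < K then -1 else p.2

def finishB (p : List Int × Int) (K : Int) : Int :=
  match p.1 with
  | [] => -1
  | m :: _ => if m < K then -1 else p.2

theorem finish_eq (h s : List Int) (ans : Int) (K : Int)
    (hp : h.Perm s) (hs : s.Pairwise (· ≤ ·)) :
    finishA (h, ans) K = finishB (s, ans) K := by
  cases s with
  | nil =>
      have : h = [] := hp.eq_nil
      simp [finishA, finishB, this, PySem.List.min?]
  | cons m t =>
      rw [finishA, min?_of_perm_sorted h m t hp hs]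
      rfl

theorem loop_eq (fuel : Nat) (h s : List Int) (K ans : Int)
    (hp : h.Perm s) (hs : s.Pairwise (· ≤ ·)) :
    finishA (solutionLoopA fuel h K ans) K = finishB (solutionLoopB fuel s K ans) K := by
  induction fuel generalizing h s ans with
  | zero => exact finish_eq h s ans K hp hs
  | succ fuel ih =>
      have hlen : h.length = s.length := hp.length_eq
      rcases s with _ | ⟨m1, s'⟩
      · rw [hp.eq_nil]
        simp only [solutionLoopA, solutionLoopB, List.length_nil,
          show ¬ (2 ≤ (0:Nat)) by omega, if_false]
        exact finish_eq [] [] ans K (List.Perm.refl _) hs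
      · rcases s' with _ | ⟨m2, rest⟩
        · have hne : ¬ (2 ≤ h.length) := by rw [hlen]; simp
          simp only [solutionLoopA, solutionLoopB, hne, if_false]
          exact finish_eq h [m1] ans K hp hs
        · rw [solutionLoopA, solutionLoopB]
          have h2 : 2 ≤ h.length := by rw [hlen]; simp
          have e1 := min?_of_perm_sorted h m1 (m2 :: rest) hp hs
          have hperase : (h.erase m1).Perm (m2 :: rest) := by
            have := hp.erase m1
            rwa [List.erase_cons_head] at this
          have hstail : (m2 :: rest).Pairwise (· ≤ ·) := (List.pairwise_cons.1 hs).2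
          by_cases hK : m1 < K
          · have e2 := min?_of_perm_sorted (h.erase m1) m2 rest hperase hstail
            simp only [if_pos h2, e1, e2, ge_iff_le,
              if_neg (show ¬ K ≤ m1 by omega), if_pos hK]
            have hperase2 : ((h.erase m1).erase m2).Perm rest := by
              have := hperase.erase m2
              rwa [List.erase_cons_head] at this
            have hpnext : (((h.erase m1).erase m2) ++ [m1 + m2 * 2]).Perm
                (insortLin (m1 + 2 * m2) rest) := by
              have e : m1 + m2 * 2 = m1 + 2 * m2 := by ring
              rw [e]
              refine List.Perm.trans ?_ (insortLin_perm (m1 + 2 * m2) rest).symm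
              exact (hperase2.append_right [m1 + 2 * m2]).trans
                (List.perm_append_singleton _ _)
            exact ih _ _ _ hpnext
              (insortLin_pairwise _ rest (List.pairwise_cons.1 hstail).2)
          · -- A broke with min1 popped; B broke with the list intact
            simp only [if_pos h2, e1, ge_iff_le, if_pos (show K ≤ m1 by omega), if_neg hK]
            rw [finish_eq (h.erase m1) (m2 :: rest) ans K hperase hstail]
            rw [finishB, finishB]
            have hm12 : m1 ≤ m2 := (List.pairwise_cons.1 hs).1 m2 (by simp)
            simp only [if_neg hK, if_neg (show ¬ m2 < K by omega)]

-- ===== VERDICT (by name: the statement is the Claim_ definition above) =====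
theorem solution_spec : Claim_equal_solution := by
  intro scoville K _ _
  unfold Spec_solution
  have hA : solution scoville K = finishA (solutionLoopA scoville.length scoville K 0) K := by
    unfold solution finishA
    rcases solutionLoopA scoville.length scoville K 0 with ⟨heap, answer⟩
    rfl
  have hB : solution_alt scoville K =
      finishB (solutionLoopB (PySem.List.sorted scoville (fun x => x) false).length
        (PySem.List.sorted scoville (fun x => x) false) K 0) K := by
    unfold solution_alt finishB
    rcases solutionLoopB (PySem.List.sorted scoville (fun x => x) false).length
        (PySem.List.sorted scoville (fun x => x) false) K 0 with ⟨s, count⟩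
    rcases s with _ | _ <;> rfl
  rw [hA, hB, PySem.List.length_sorted]
  exact loop_eq scoville.length scoville (PySem.List.sorted scoville (fun x => x) false) K 0
    (PySem.List.sorted_perm scoville (fun x => x) false).symm
    (PySem.List.sorted_pairwise scoville (fun x => x))
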